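-- pv_equiv track=rewrite | github.com/tompkinsjp/triangles | tompkins_triangle.py | build_tompkins_triangle
-- ===== SOURCE A (Python) =====
-- def build_tompkins_triangle(k: int, n_max: int):
--     """
--     Construct T_k up to row n_max (inclusive).
--     c = k-2
--     T_k(0,0) = c
--     For n >= 1: T_k(n,0) = 1, T_k(n,n) = c
--     Interior:   T_k(n,r) = T_k(n-1,r-1) + T_k(n-1,r)
--     Returns list of rows (row n has length n+1).
--     """
--     assert k >= 3 and n_max >= 0
--     c = k - 2
--     T = [[c]]  # row 0
--     for n in range(1, n_max + 1):
--         row = [1] + [0]*(n-1) + [c]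
--         for r in range(1, n):
--             row[r] = T[n-1][r-1] + T[n-1][r]
--         T.append(row)
--     return T, c
-- ===== SOURCE B (Python) =====
-- def _row(c, n):
--     """Row n (n >= 1) directly: entry r is C(n-1,r) + c*C(n-1,r-1),
--     with the binomials produced multiplicatively while walking r."""
--     row = []
--     b, prev = 1, 0  # C(n-1, r), C(n-1, r-1)
--     for r in range(n + 1):
--         row.append(b + c * prev)
--         b, prev = b * (n - 1 - r) // (r + 1), b
--     return row
--
--
-- def build_tompkins_triangle(k: int, n_max: int):
--     assert k >= 3 and n_max >= 0
--     c = k - 2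
--     return [[c]] + [_row(c, n) for n in range(1, n_max + 1)], c
-- ===== Notes on version B (the rewrite author's own statement) =====
-- stated objective: alternative
-- what changed: Each row is computed independently from the closed form T(n,r) = C(n-1,r) + c*C(n-1,r-1), walking the binomials multiplicatively along the row, instead of deriving every row from the previous one by Pascal sums in a mutated list.
import Mathlib
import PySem

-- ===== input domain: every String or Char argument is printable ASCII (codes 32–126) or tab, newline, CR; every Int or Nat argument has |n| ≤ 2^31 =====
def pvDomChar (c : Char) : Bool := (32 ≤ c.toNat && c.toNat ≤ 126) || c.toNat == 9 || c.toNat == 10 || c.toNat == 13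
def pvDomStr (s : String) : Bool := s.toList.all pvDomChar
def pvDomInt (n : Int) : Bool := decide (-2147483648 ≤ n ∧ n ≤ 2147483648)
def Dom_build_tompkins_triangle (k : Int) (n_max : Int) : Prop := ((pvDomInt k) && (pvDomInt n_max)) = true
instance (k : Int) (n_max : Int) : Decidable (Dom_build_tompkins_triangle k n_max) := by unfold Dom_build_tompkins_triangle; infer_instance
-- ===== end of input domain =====

-- B replaces A's Pascal recurrence (each row summed from the previous row in a mutated list) by
-- computing every row independently from the closed form C(n-1,r) + c*C(n-1,r-1), the binomials
-- produced multiplicatively while walking the row (objective: alternative).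

-- ===== PORT A =====
-- Literal port of A. Python's assert is reflected by Pre_ below; for n_max ≥ 1 all list
-- indices (n-1, r-1, r) are nonnegative and in range, so T[...] is ported with List.getD.
def build_tompkins_triangle (k : Int) (n_max : Int) : List (List Int) × Int :=
  let c := k - 2
  let T : List (List Int) := [[c]]
  let T := (List.range' 1 n_max.toNat).foldl (fun T n =>
    let row : List Int := [1] ++ List.replicate (n - 1) 0 ++ [c]
    let row := (List.range' 1 (n - 1)).foldl
      (fun row r => row.set r ((T.getD (n - 1) []).getD (r - 1) 0 + (T.getD (n - 1) []).getD r 0))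
      row
    T ++ [row]) T
  (T, c)

-- ===== PORT B =====
-- Port of Source B's _row: state (row, b, prev); '//' = PySem.Int.floordiv.
def rowAlt (c : Int) (n : Nat) : List Int :=
  ((List.range (n + 1)).foldl
    (fun (st : List Int × Int × Int) (r : Nat) =>
      (st.1 ++ [st.2.1 + c * st.2.2],
       PySem.Int.floordiv (st.2.1 * ((n : Int) - 1 - (r : Int))) ((r : Int) + 1),
       st.2.1))
    ([], 1, 0)).1

def build_tompkins_triangle_alt (k : Int) (n_max : Int) : List (List Int) × Int :=
  let c := k - 2
  ([[c]] ++ (List.range' 1 n_max.toNat).map (fun (n : Nat) => rowAlt c n), c)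

-- ===== PRECONDITION & SPEC =====
-- Exactly the inputs A's assert admits (otherwise Python raises AssertionError).
def Pre_build_tompkins_triangle (k : Int) (n_max : Int) : Prop := 3 ≤ k ∧ 0 ≤ n_max
instance (k : Int) (n_max : Int) : Decidable (Pre_build_tompkins_triangle k n_max) := by
  unfold Pre_build_tompkins_triangle; infer_instance

def pvWitness_build_tompkins_triangle : Int × Int := (5, 4)

def Spec_build_tompkins_triangle (k : Int) (n_max : Int) (out : List (List Int) × Int) : Prop :=
  out = build_tompkins_triangle_alt k n_max
instance (k : Int) (n_max : Int) (out : List (List Int) × Int) :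
    Decidable (Spec_build_tompkins_triangle k n_max out) := by
  unfold Spec_build_tompkins_triangle; infer_instance

-- ===== CLAIM (what is proved, stated in full; the proofs are below) =====
def Claim_equal_build_tompkins_triangle : Prop := ∀ (k : Int) (n_max : Int),
  Dom_build_tompkins_triangle k n_max → Pre_build_tompkins_triangle k n_max →
  Spec_build_tompkins_triangle k n_max (build_tompkins_triangle k n_max)

-- ===== LEMMAS AND PROOFS =====

-- closed-form value of an entry: Ent c N r = C(N,r) + c*C(N,r-1)  (second term 0 at r = 0)
def Ent (c : Int) (N r : Nat) : Int :=
  (N.choose r : Int) + c * (if r = 0 then 0 else (N.choose (r - 1) : Int))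

-- row n (n ≥ 1) of the triangle in closed form
def specRow (c : Int) (n : Nat) : List Int := (List.range (n + 1)).map (Ent c (n - 1))

-- row n of the triangle, including the special row 0
def prow (c : Int) (n : Nat) : List Int := if n = 0 then [c] else specRow c n

-- A's loop body, named for the proofs (definitionally the lambda in the A port).
def stepA (c : Int) (T : List (List Int)) (n : Nat) : List (List Int) :=
  T ++ [(List.range' 1 (n - 1)).foldl
      (fun row r => row.set r ((T.getD (n - 1) []).getD (r - 1) 0 + (T.getD (n - 1) []).getD r 0))
      ([1] ++ List.replicate (n - 1) 0 ++ [c])]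

-- one multiplicative step of the binomial walk: C(N,r)*(N-r) // (r+1) = C(N,r+1), for every r
lemma mul_step (N r : Nat) :
    PySem.Int.floordiv ((N.choose r : Int) * ((N : Int) - (r : Int))) ((r : Int) + 1)
      = (N.choose (r + 1) : Int) := by
  by_cases h : r < N
  · have h1 : (N : Int) - (r : Int) = ((N - r : Nat) : Int) := by omega
    have h2 : ((r : Int) + 1) = ((r + 1 : Nat) : Int) := by omega
    rw [h1, h2, ← Nat.cast_mul, PySem.Int.floordiv_natCast]
    congr 1
    rw [← Nat.choose_succ_right_eq, Nat.mul_div_cancel _ (by omega)]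
  · have hz : (N.choose r : Int) * ((N : Int) - (r : Int)) = 0 := by
      rcases Nat.eq_or_lt_of_le (Nat.le_of_not_lt h) with he | hl
      · rw [he]; simp
      · rw [Nat.choose_eq_zero_of_lt hl]; simp
    rw [hz, Nat.choose_eq_zero_of_lt (by omega),
        show (0 : Int) = ((0 : Nat) : Int) from rfl,
        show ((r : Int) + 1) = ((r + 1 : Nat) : Int) from by omega,
        PySem.Int.floordiv_natCast]
    simp

-- invariant of Source B's inner loop: row collects Ent values, b and prev walk the binomials
lemma rowAlt_inv (c : Int) (n : Nat) (hn : 1 ≤ n) : ∀ m,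
    (List.range m).foldl
      (fun (st : List Int × Int × Int) (r : Nat) =>
        (st.1 ++ [st.2.1 + c * st.2.2],
         PySem.Int.floordiv (st.2.1 * ((n : Int) - 1 - (r : Int))) ((r : Int) + 1),
         st.2.1))
      ([], 1, 0)
    = ((List.range m).map (Ent c (n - 1)), ((n - 1).choose m : Int),
        if m = 0 then 0 else ((n - 1).choose (m - 1) : Int)) := by
  intro m
  induction m with
  | zero => simp
  | succ m ih =>
    rw [List.range_succ, List.foldl_append, ih]
    simp only [List.foldl_cons, List.foldl_nil, List.map_append]
    refine Prod.ext ?_ (Prod.ext ?_ ?_)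
    · show _ ++ [((n - 1).choose m : Int) + c * _] = _ ++ List.map (Ent c (n - 1)) [m]
      simp [Ent]
    · show PySem.Int.floordiv _ _ = _
      rw [show (n : Int) - 1 - (m : Int) = ((n - 1 : Nat) : Int) - (m : Int) from by omega]
      exact mul_step (n - 1) m
    · simp

lemma rowAlt_eq_spec (c : Int) (n : Nat) (hn : 1 ≤ n) : rowAlt c n = specRow c n := by
  unfold rowAlt specRow
  rw [rowAlt_inv c n hn (n + 1)]

lemma specRow_length (c : Int) (n : Nat) : (specRow c n).length = n + 1 := by simp [specRow]

lemma specRow_getElem? (c : Int) (n r : Nat) (hr : r ≤ n) :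
    (specRow c n)[r]? = some (Ent c (n - 1) r) := by
  unfold specRow
  rw [List.getElem?_map, List.getElem?_range (by omega)]
  rfl

lemma specRow_getD (c : Int) (n r : Nat) (hr : r ≤ n) :
    (specRow c n).getD r 0 = Ent c (n - 1) r := by
  rw [List.getD_eq_getElem?_getD, specRow_getElem? c n r hr]
  rfl

lemma pascal (c : Int) (N r : Nat) (hr : 1 ≤ r) (hrN : r ≤ N) :
    Ent c (N - 1) (r - 1) + Ent c (N - 1) r = Ent c N r := by
  obtain ⟨M, rfl⟩ : ∃ M, N = M + 1 := ⟨N - 1, by omega⟩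
  obtain ⟨s, rfl⟩ : ∃ s, r = s + 1 := ⟨r - 1, by omega⟩
  simp only [Nat.add_sub_cancel, Ent]
  cases s with
  | zero =>
    simp [Nat.choose_succ_succ]
    ring
  | succ t =>
    simp only [Nat.succ_ne_zero, Nat.add_sub_cancel, if_false]
    rw [Nat.choose_succ_succ M (t + 1), Nat.choose_succ_succ M t]
    push_cast [Nat.succ_eq_add_one]
    ring

-- writing v r at positions s, s+1, …, s+m-1 of init (all in range)
lemma foldl_set_getElem? (v : Nat → Int) : ∀ (m s : Nat) (init : List Int) (i : Nat),
    s + m ≤ init.length →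
    ((List.range' s m).foldl (fun row r => row.set r (v r)) init)[i]? =
      if s ≤ i ∧ i < s + m then some (v i) else init[i]? := by
  intro m
  induction m with
  | zero =>
    intro s init i h
    rw [if_neg (by omega)]
    simp
  | succ m ih =>
    intro s init i h
    rw [List.range'_succ, List.foldl_cons,
        ih (s + 1) (init.set s (v s)) i (by simp; omega)]
    by_cases hi : i = s
    · subst hi
      rw [if_neg (by omega), if_pos (by omega), List.getElem?_set_self (by omega)]
    · rw [List.getElem?_set_ne (by omega)]
      by_cases h2 : s + 1 ≤ i ∧ i < s + 1 + m
      · rw [if_pos h2, if_pos (by omega)]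
      · rw [if_neg h2, if_neg (by omega)]

lemma init_getElem? (c : Int) (n i : Nat) (hn : 1 ≤ n) :
    ([1] ++ List.replicate (n - 1) (0 : Int) ++ [c])[i]? =
      if i = 0 then some 1 else if i = n then some c else if i < n then some 0 else none := by
  rcases Nat.lt_or_ge i (n + 1) with hi | hi
  · rcases Nat.eq_or_lt_of_le (Nat.zero_le i) with h0 | h0
    · simp [← h0]
    · rcases Nat.eq_or_lt_of_le (Nat.le_of_lt_succ hi) with hn' | hn'
      · subst hn'
        rw [if_neg (by omega), if_pos rfl,
            List.getElem?_append_right (by simp; omega)]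
        have hlen : ([1] ++ List.replicate (i - 1) (0 : Int)).length = i := by simp; omega
        rw [hlen, Nat.sub_self]
        rfl
      · rw [if_neg (by omega), if_neg (by omega), if_pos hn',
            List.append_assoc, List.getElem?_append_right (by simp; omega),
            List.getElem?_append_left (by simp; omega),
            List.getElem?_replicate, if_pos (by simp; omega)]
  · rw [if_neg (by omega), if_neg (by omega), if_neg (by omega)]
    rw [List.getElem?_eq_none]
    simp; omega

lemma inner_row (c : Int) (n : Nat) (hn : 1 ≤ n) :
    (List.range' 1 (n - 1)).foldl
      (fun row r => row.set r ((prow c (n - 1)).getD (r - 1) 0 + (prow c (n - 1)).getD r 0))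
      ([1] ++ List.replicate (n - 1) 0 ++ [c]) = specRow c n := by
  apply List.ext_getElem?
  intro i
  rw [foldl_set_getElem? _ (n - 1) 1 _ i (by simp; omega)]
  by_cases hint : 1 ≤ i ∧ i < 1 + (n - 1)
  · -- interior entry: set by the loop; uses Pascal's rule (forces n ≥ 2)
    rw [if_pos hint]
    have hn2 : 2 ≤ n := by omega
    have hp : prow c (n - 1) = specRow c (n - 1) := by unfold prow; rw [if_neg (by omega)]
    rw [hp, specRow_getD c (n - 1) (i - 1) (by omega),
        specRow_getD c (n - 1) i (by omega),
        specRow_getElem? c n i (by omega)]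
    have hpas := pascal c (n - 1) i (by omega) (by omega)
    rw [show n - 1 - 1 = n - 2 from by omega] at hpas ⊢
    rw [hpas]
  · rw [if_neg hint, init_getElem? c n i hn]
    by_cases h0 : i = 0
    · subst h0
      rw [if_pos rfl, specRow_getElem? c n 0 (by omega)]
      simp [Ent]
    · by_cases hn' : i = n
      · subst hn'
        rw [if_neg h0, if_pos rfl, specRow_getElem? c i i (by omega)]
        simp [Ent, Nat.choose_eq_zero_of_lt (show i - 1 < i by omega), h0]
      · rw [if_neg h0, if_neg hn', if_neg (by omega)]
        rw [List.getElem?_eq_none (by rw [specRow_length]; omega)]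

lemma step_row (c : Int) (m : Nat) :
    stepA c ((List.range (m + 1)).map (prow c)) (m + 1) =
      (List.range (m + 2)).map (prow c) := by
  unfold stepA
  have hget : ((List.range (m + 1)).map (prow c)).getD (m + 1 - 1) [] = prow c m := by
    simp [List.getD_eq_getElem?_getD]
  rw [hget]
  rw [show (List.range (m + 2)) = List.range (m + 1) ++ [m + 1] from List.range_succ,
      List.map_append]
  congr 1
  simp only [List.map_cons, List.map_nil]
  congr 1
  have h := inner_row c (m + 1) (by omega)
  simp only [Nat.add_sub_cancel] at h ⊢
  rw [h]
  unfold prow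
  rw [if_neg (by omega)]

lemma loop_inv (c : Int) : ∀ m,
    (List.range' 1 m).foldl (stepA c) [[c]] = (List.range (m + 1)).map (prow c) := by
  intro m
  induction m with
  | zero => simp [prow]
  | succ m ih =>
    rw [List.range'_concat, List.foldl_append, ih]
    simp only [List.foldl_cons, List.foldl_nil]
    rw [show 1 + 1 * m = m + 1 from by omega]
    exact step_row c m

lemma range_map_prow (c : Int) (m : Nat) :
    (List.range (m + 1)).map (prow c) = [[c]] ++ (List.range' 1 m).map (fun n => rowAlt c n) := by
  have ht : (List.range' 1 m).map (prow c) = (List.range' 1 m).map (fun n => rowAlt c n) := by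
    apply List.map_congr_left
    intro j hj
    rw [List.mem_range'_1] at hj
    rw [rowAlt_eq_spec c j (by omega)]
    unfold prow
    rw [if_neg (by omega)]
  rw [List.range_eq_range', List.range'_succ, List.map_cons, ht]
  rfl

-- ===== VERDICT (by name: the statement is the Claim_ definition above) =====
theorem build_tompkins_triangle_spec : Claim_equal_build_tompkins_triangle := by
  intro k n_max _ _
  unfold Spec_build_tompkins_triangle
  show ((List.range' 1 n_max.toNat).foldl (stepA (k - 2)) [[k - 2]], k - 2) =
    ([[k - 2]] ++ (List.range' 1 n_max.toNat).map (fun n => rowAlt (k - 2) n), k - 2)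
  rw [loop_inv, range_map_prow]
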